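-- pv_equiv track=rewrite | github.com/darkfos/CodeLibrary | CodeWars/PYTHON/apple_boxes.py | apple_boxes
-- ===== SOURCE A (Python) =====
-- def apple_boxes(k):
--     #7 kyu
--
--     yellow_apple: int = 0
--     red_apple: int = 0
--     for box in range(1, k+1):
--         if box % 2 == 0:
--             red_apple += box**2
--         else:
--             yellow_apple += box**2
--     return red_apple - yellow_apple
-- ===== SOURCE B (Python) =====
-- def apple_boxes(k):
--     if k < 0:
--         return 0
--     t = k * (k + 1) // 2
--     return t if k % 2 == 0 else -t
-- ===== Notes on version B (the rewrite author's own statement) =====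
-- stated objective: faster
-- what changed: replaced the linear loop summing even and odd squares separately by the closed-form signed triangular-number formula, negated for odd k
import Mathlib
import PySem

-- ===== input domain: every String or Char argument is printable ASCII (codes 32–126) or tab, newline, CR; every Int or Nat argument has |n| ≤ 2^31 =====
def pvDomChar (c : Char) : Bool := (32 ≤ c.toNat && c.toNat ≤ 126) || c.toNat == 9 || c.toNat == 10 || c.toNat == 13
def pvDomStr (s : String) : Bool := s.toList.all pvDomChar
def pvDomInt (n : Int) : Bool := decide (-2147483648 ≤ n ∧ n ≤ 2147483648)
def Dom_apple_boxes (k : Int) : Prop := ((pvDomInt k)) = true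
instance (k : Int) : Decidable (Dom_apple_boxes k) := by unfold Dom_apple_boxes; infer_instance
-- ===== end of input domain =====

-- B replaces A's linear loop by a closed-form signed triangular-number formula (faster, proved equal).

-- ===== PORT A =====
-- loop body of A: add box**2 to red if box is even, else to yellow; state = (yellow, red)
def appleStep (st : Int × Int) (box : Int) : Int × Int :=
  if PySem.Int.mod box 2 == 0 then (st.1, st.2 + box ^ 2) else (st.1 + box ^ 2, st.2)

def apple_boxes (k : Int) : Int :=
  let s := (PySem.List.pyRange 1 (k + 1) 1).foldl appleStep (0, 0)
  s.2 - s.1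

-- ===== PORT B =====
def apple_boxes_alt (k : Int) : Int :=
  if k < 0 then 0
  else if PySem.Int.mod k 2 == 0 then PySem.Int.floordiv (k * (k + 1)) 2
  else -(PySem.Int.floordiv (k * (k + 1)) 2)

-- ===== PRECONDITION & SPEC =====
def Spec_apple_boxes (k : Int) (out : Int) : Prop := out = apple_boxes_alt k
instance (k : Int) (out : Int) : Decidable (Spec_apple_boxes k out) := by unfold Spec_apple_boxes; infer_instance

-- ===== CLAIM (what is proved, stated in full; the proofs are below) =====
def Claim_equal_apple_boxes : Prop := ∀ (k : Int), Dom_apple_boxes k → Spec_apple_boxes k (apple_boxes k)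

-- ===== LEMMAS AND PROOFS =====

theorem pymod_two (a : Int) : PySem.Int.mod a 2 = a % 2 :=
  PySem.Int.mod_eq_emod_of_pos (by norm_num)

theorem apple_boxes_double (n : Nat) :
    2 * apple_boxes (n : Int)
      = if (n : Int) % 2 = 0 then (n : Int) * ((n : Int) + 1) else -((n : Int) * ((n : Int) + 1)) := by
  induction n with
  | zero =>
      simp [apple_boxes, PySem.List.pyRange_one_eq_nil]
  | succ m ih =>
      have hsplit : PySem.List.pyRange 1 ((m : Int) + 1 + 1) 1
          = PySem.List.pyRange 1 ((m : Int) + 1) 1 ++ [(m : Int) + 1] :=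
        PySem.List.pyRange_one_succ_right (by omega : (1 : Int) ≤ (m : Int) + 1)
      have hA : apple_boxes ((m : Int) + 1)
          = (appleStep ((PySem.List.pyRange 1 ((m : Int) + 1) 1).foldl appleStep (0, 0)) ((m : Int) + 1)).2
            - (appleStep ((PySem.List.pyRange 1 ((m : Int) + 1) 1).foldl appleStep (0, 0)) ((m : Int) + 1)).1 := by
        simp [apple_boxes, hsplit, List.foldl_append]
      have hAm : apple_boxes (m : Int)
          = ((PySem.List.pyRange 1 ((m : Int) + 1) 1).foldl appleStep (0, 0)).2
            - ((PySem.List.pyRange 1 ((m : Int) + 1) 1).foldl appleStep (0, 0)).1 := by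
        simp [apple_boxes]
      push_cast
      push_cast at ih
      rcases Int.even_or_odd (m : Int) with ⟨t, ht⟩ | ⟨t, ht⟩
      · -- m even, m+1 odd
        have hm2 : (m : Int) % 2 = 0 := by omega
        have hm12 : ((m : Int) + 1) % 2 = 1 := by omega
        have hstep : (PySem.Int.mod ((m : Int) + 1) 2 == 0) = false := by
          simp only [pymod_two, beq_eq_false_iff_ne, ne_eq]; omega
        rw [hA]
        simp only [appleStep, hstep, Bool.false_eq_true, if_false]
        simp only [hm2, if_true] at ih
        simp only [hm12]
        rw [hAm] at ih
        norm_num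
        ring_nf
        ring_nf at ih
        omega
      · -- m odd, m+1 even
        have hm2 : (m : Int) % 2 = 1 := by omega
        have hm12 : ((m : Int) + 1) % 2 = 0 := by omega
        have hstep : (PySem.Int.mod ((m : Int) + 1) 2 == 0) = true := by
          simp only [pymod_two, beq_iff_eq]; omega
        rw [hA]
        simp only [appleStep, hstep, if_true]
        simp only [hm2] at ih
        norm_num at ih
        simp only [hm12, if_true]
        rw [hAm] at ih
        ring_nf
        ring_nf at ih
        omega

theorem apple_boxes_eq_alt (k : Int) : apple_boxes k = apple_boxes_alt k := by
  rcases lt_or_ge k 0 with hneg | hpos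
  · have h1 : apple_boxes k = 0 := by
      simp [apple_boxes, PySem.List.pyRange_one_eq_nil (by omega : k + 1 ≤ 1)]
    have h2 : apple_boxes_alt k = 0 := by simp [apple_boxes_alt, hneg]
    rw [h1, h2]
  · obtain ⟨n, rfl⟩ := Int.eq_ofNat_of_zero_le hpos
    have hd := apple_boxes_double n
    unfold apple_boxes_alt
    rw [if_neg (by omega)]
    have hfd : PySem.Int.floordiv ((n : Int) * ((n : Int) + 1)) 2
        = ((n : Int) * ((n : Int) + 1)) / 2 :=
      PySem.Int.floordiv_eq_ediv_of_pos (by norm_num)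
    rcases Int.even_or_odd (n : Int) with ⟨t, ht⟩ | ⟨t, ht⟩
    · have hm : (PySem.Int.mod (n : Int) 2 == 0) = true := by
        simp only [pymod_two, beq_iff_eq]; omega
      rw [if_pos hm, hfd]
      simp only [show ((n : Int)) % 2 = 0 by omega, if_true] at hd
      rw [show (n : Int) * ((n : Int) + 1) = 2 * apple_boxes (n : Int) from hd.symm,
        Int.mul_ediv_cancel_left _ (by norm_num)]
    · have hm : ¬ ((PySem.Int.mod (n : Int) 2 == 0) = true) := by
        simp only [pymod_two, beq_iff_eq]; omega
      rw [if_neg hm, hfd]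
      simp only [show ¬((n : Int)) % 2 = 0 by omega, if_false] at hd
      rw [show (n : Int) * ((n : Int) + 1) = 2 * (-apple_boxes (n : Int)) by omega,
        Int.mul_ediv_cancel_left _ (by norm_num)]
      ring

-- ===== VERDICT (by name: the statement is the Claim_ definition above) =====
theorem apple_boxes_spec : Claim_equal_apple_boxes := by
  intro k _
  unfold Spec_apple_boxes
  exact apple_boxes_eq_alt k
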